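-- pv_equiv track=rewrite | github.com/pranaliSawadh/python-practical | practical6/validity.py | get_valid_invalid_text_count
-- ===== SOURCE A (Python) =====
-- def check_validity(text):
-- 		pairs = {'(':')','{':'}','<':'>','[':']'}
-- 		symbols = ['(',')','[',']','{','}','<','>']
-- 		stack = []	#initialize empty stack
-- 		for symbol in text :
-- 			if symbol in symbols:
-- 				if symbol in pairs:			#checks if symbol is opening symbol
-- 					stack.append(symbol)		#push opening symbol to the stack
-- 				elif symbol in pairs.values():		#checks if symbol is closing symbol
-- 					if stack ==[]:
-- 						return "invalid string : no opening symbol to match closing symbol"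
-- 					stack_top = stack.pop()		#access topmost element of stack
-- 					if pairs[stack_top] !=symbol:
-- 						return "invalid string :last opening symbol do not matches the closing symbol"
-- 			else:
-- 				return "invalid string : Invalid character"
-- 		if stack == []:		#if stack is empty means every open symbol has its closing symbol
-- 			return "valid string"
-- 		else:
-- 			return "invalid string : no closing symbol found for last opening symbol"
--
-- def get_valid_invalid_text_count(texts_list):
--    valid_count = 0
--    invalid_count = 0
--    list_of_valid = []
--    for i in texts_list:
--    	if isinstance(i,str):		#checks if i is string or not
--    		list_of_valid.append(check_validity(i))
--    for j in list_of_valid: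
--    			if j.startswith("valid"):
--    				valid_count+=1
--    			else:
--    				invalid_count+=1
--    return (valid_count,invalid_count)
-- ===== SOURCE B (Python) =====
-- PAIR = {'(': ')', '[': ']', '{': '}', '<': '>'}
--
-- def _parse(s):
--     # Recursive-descent: consume a maximal run of balanced groups from the
--     # front of s; return the unconsumed suffix, or None on a broken group.
--     while s and s[0] in PAIR:
--         rest = _parse(s[1:])
--         if rest is None or not rest or rest[0] != PAIR[s[0]]:
--             return None
--         s = rest[1:]
--     return s
--
-- def get_valid_invalid_text_count(texts_list):
--     strs = [t for t in texts_list if isinstance(t, str)]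
--     valid = sum(1 for s in strs if _parse(s) == '')
--     return (valid, len(strs) - valid)
-- ===== Notes on version B (the rewrite author's own statement) =====
-- stated objective: alternative
-- what changed: check_validity's iterative stack scan with verdict strings is replaced by a recursive-descent parser that consumes maximal runs of balanced groups and returns the unconsumed suffix (valid iff the whole string is consumed), and the two-pass counting over a materialized verdict list is replaced by counting accepted strings once with the invalid count derived by subtraction.
import Mathlib
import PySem

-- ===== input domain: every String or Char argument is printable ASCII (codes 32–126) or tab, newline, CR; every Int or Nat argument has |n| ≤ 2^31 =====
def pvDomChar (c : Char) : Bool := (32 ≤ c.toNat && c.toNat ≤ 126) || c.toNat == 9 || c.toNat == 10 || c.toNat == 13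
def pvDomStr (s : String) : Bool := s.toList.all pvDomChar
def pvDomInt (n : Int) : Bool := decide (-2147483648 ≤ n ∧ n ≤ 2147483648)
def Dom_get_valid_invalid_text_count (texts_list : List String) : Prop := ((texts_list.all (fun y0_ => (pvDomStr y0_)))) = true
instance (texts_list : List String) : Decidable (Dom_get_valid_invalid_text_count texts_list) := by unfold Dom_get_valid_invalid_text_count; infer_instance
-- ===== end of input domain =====

-- B replaces A's stack scan + verdict strings + two-pass counting by a
-- recursive-descent parser (valid iff it consumes the whole string) and one
-- counting pass with the invalid count derived by subtraction (objective: alternative).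

-- ===== PORT A =====
def pvPairs : PySem.Dict Char Char := PySem.Dict.mk [('(',')'),('{','}'),('<','>'),('[',']')]
def pvSymbols : List Char := ['(',')','[',']','{','}','<','>']

-- the scan loop of check_validity; pairs[stack_top] can never raise (only keys of
-- pairs are ever pushed), ported as getD with an unused default
def pvCheckLoop : List Char → List Char → String
  | [], stack => if stack = [] then "valid string"
                 else "invalid string : no closing symbol found for last opening symbol"
  | symbol :: rest, stack =>
    if symbol ∈ pvSymbols then
      if pvPairs.contains symbol then pvCheckLoop rest (symbol :: stack)
      else if symbol ∈ pvPairs.values then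
        match stack with
        | [] => "invalid string : no opening symbol to match closing symbol"
        | stack_top :: stack' =>
          if pvPairs.getD stack_top ' ' ≠ symbol then
            "invalid string :last opening symbol do not matches the closing symbol"
          else pvCheckLoop rest stack'
      else pvCheckLoop rest stack
    else "invalid string : Invalid character"

def check_validity (text : String) : String := pvCheckLoop text.toList []

def get_valid_invalid_text_count (texts_list : List String) : Int × Int :=
  -- isinstance(i, str) is always true for a List String argument
  let list_of_valid := texts_list.foldl (fun acc i => acc ++ [check_validity i]) []
  let counts := list_of_valid.foldl
    (fun (c : Int × Int) j =>
      if PySem.Str.startswith j "valid" then (c.1 + 1, c.2) else (c.1, c.2 + 1))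
    (0, 0)
  counts

-- ===== PORT B =====
def pvPair : PySem.Dict Char Char := PySem.Dict.mk [('(',')'),('[',']'),('{','}'),('<','>')]

-- Source B's _parse: consume a maximal run of balanced groups from the front;
-- some = the unconsumed suffix, none = a broken group.  The while loop is the
-- tail call on rest[1:]; the length bound in the result type only justifies
-- termination.
def pvParse : (s : List Char) → Option {r : List Char // r.length ≤ s.length}
  | [] => some ⟨[], Nat.le.refl⟩
  | c :: t =>
    match pvPair.get? c with
    | none => some ⟨c :: t, Nat.le.refl⟩
    | some cl =>
      match pvParse t with
      | none => none
      | some ⟨[], _⟩ => none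
      | some ⟨d :: r, hr⟩ =>
        if d = cl then
          match pvParse r with
          | none => none
          | some ⟨r', hr'⟩ =>
            some ⟨r', by simp only [List.length_cons] at *; omega⟩
        else none
termination_by s => s.length
decreasing_by
  · simp only [List.length_cons]; omega
  · simp only [List.length_cons] at *; omega

def get_valid_invalid_text_count_alt (texts_list : List String) : Int × Int :=
  let strs := texts_list   -- isinstance(t, str) is always true here
  let valid : Int :=
    (strs.countP (fun s => (pvParse s.toList).map Subtype.val == some []) : Int)
  (valid, (strs.length : Int) - valid)

-- ===== PRECONDITION & SPEC =====
def Spec_get_valid_invalid_text_count (texts_list : List String) (out : Int × Int) : Prop := out = get_valid_invalid_text_count_alt texts_list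
instance (texts_list : List String) (out : Int × Int) : Decidable (Spec_get_valid_invalid_text_count texts_list out) := by unfold Spec_get_valid_invalid_text_count; infer_instance

-- ===== CLAIM =====
def Claim_equal_get_valid_invalid_text_count : Prop := ∀ (texts_list : List String), Dom_get_valid_invalid_text_count texts_list → Spec_get_valid_invalid_text_count texts_list (get_valid_invalid_text_count texts_list)

-- ===== LEMMAS AND PROOFS =====

-- proof-side: the boolean stack scan, the bridge between A's verdict strings
-- and B's parser
def pvClosers : PySem.Dict Char Char := PySem.Dict.mk [(')','('),(']','['),('}','{'),('>','<')]

def pvValidLoop : List Char → List Char → Bool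
  | [], stack => stack.isEmpty
  | ch :: rest, stack =>
    if ch ∈ ['(','[','{','<'] then pvValidLoop rest (ch :: stack)
    else
      match pvClosers.get? ch with
      | some opener =>
        match stack with
        | [] => false
        | top :: stack' => if top ≠ opener then false else pvValidLoop rest stack'
      | none => false

-- for a closing symbol c with opener o, pairs[top] = c forces top = o
theorem pv_getD_unique (c o : Char) (hco : (c, o) ∈ [(')','('),(']','['),('}','{'),('>','<')])
    (top : Char) (h : ¬ top = o) : ¬ pvPairs.getD top ' ' = c := by
  fin_cases hco <;>
    (simp [pvPairs, PySem.Dict.getD, PySem.Dict.get?_mk_cons]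
     split_ifs <;> simp_all [PySem.Dict.get?, eq_comm])

-- one opening symbol: both loops push and recurse
theorem pv_step_open (c : Char) (hc : c ∈ (['(','[','{','<'] : List Char)) (rest st : List Char)
    (ih : ∀ st, PySem.Str.startswith (pvCheckLoop rest st) "valid" = pvValidLoop rest st) :
    PySem.Str.startswith (pvCheckLoop (c :: rest) st) "valid" = pvValidLoop (c :: rest) st := by
  fin_cases hc <;>
    (simp [pvCheckLoop, pvValidLoop, pvSymbols, pvPairs, PySem.Dict.contains]
     simpa using ih _)

-- one closing symbol: both loops pop and compare, agreeing in every stack case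
theorem pv_step_close (c o : Char) (hco : (c, o) ∈ [(')','('),(']','['),('}','{'),('>','<')])
    (rest st : List Char)
    (ih : ∀ st, PySem.Str.startswith (pvCheckLoop rest st) "valid" = pvValidLoop rest st) :
    PySem.Str.startswith (pvCheckLoop (c :: rest) st) "valid" = pvValidLoop (c :: rest) st := by
  have hget : pvClosers.get? c = some o := by fin_cases hco <;> decide
  have hsym : c ∈ pvSymbols := by fin_cases hco <;> decide
  have hkey : ¬ (pvPairs.contains c = true) := by fin_cases hco <;> decide
  have hval : c ∈ pvPairs.values := by fin_cases hco <;> decide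
  have hopen : ¬ (c ∈ (['(','[','{','<'] : List Char)) := by fin_cases hco <;> decide
  have hmatch : pvPairs.getD o ' ' = c := by fin_cases hco <;> decide
  cases st with
  | nil =>
    simp only [pvCheckLoop, pvValidLoop, if_pos hsym, if_neg hkey, if_pos hval,
      if_neg hopen, hget]
    decide
  | cons top st' =>
    simp only [pvCheckLoop, pvValidLoop, if_pos hsym, if_neg hkey, if_pos hval,
      if_neg hopen, hget]
    by_cases htop : top = o
    · subst htop
      rw [if_neg (show ¬ (pvPairs.getD top ' ' ≠ c) by simp [hmatch]),
        if_neg (show ¬ (top ≠ top) by simp)]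
      simpa using ih st'
    · rw [if_pos (pv_getD_unique c o hco top htop), if_pos htop]
      decide

-- any other character: A returns the invalid-character verdict, B's scan false
theorem pv_step_other (c : Char) (rest st : List Char)
    (ho : ¬(c = '(' ∨ c = '[' ∨ c = '{' ∨ c = '<'))
    (hc : ¬(c = ')' ∨ c = ']' ∨ c = '}' ∨ c = '>')) :
    PySem.Str.startswith (pvCheckLoop (c :: rest) st) "valid" = pvValidLoop (c :: rest) st := by
  push_neg at ho hc
  obtain ⟨h1, h2, h3, h4⟩ := ho
  obtain ⟨h5, h6, h7, h8⟩ := hc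
  have hsym : ¬ (c ∈ pvSymbols) := by
    simp only [pvSymbols, List.mem_cons, List.not_mem_nil, or_false]
    tauto
  have hopen : ¬ (c ∈ (['(','[','{','<'] : List Char)) := by
    simp only [List.mem_cons, List.not_mem_nil, or_false]
    tauto
  have hget : pvClosers.get? c = none := by
    simp [pvClosers, PySem.Dict.get?_mk_cons, PySem.Dict.get?, Ne.symm h5, Ne.symm h6,
      Ne.symm h7, Ne.symm h8]
  simp only [pvCheckLoop, pvValidLoop, if_neg hsym, if_neg hopen, hget]
  simp [PySem.Str.startswith]; decide

-- the two scanning loops agree: A's verdict starts with "valid" iff the scan accepts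
theorem pvLoop_agree (cs : List Char) : ∀ st : List Char,
    PySem.Str.startswith (pvCheckLoop cs st) "valid" = pvValidLoop cs st := by
  induction cs with
  | nil =>
    intro st
    cases st <;> (simp [pvCheckLoop, pvValidLoop]; decide)
  | cons c rest ih =>
    intro st
    by_cases ho : c = '(' ∨ c = '[' ∨ c = '{' ∨ c = '<'
    · exact pv_step_open c (by simpa using ho) rest st ih
    · by_cases hc : c = ')' ∨ c = ']' ∨ c = '}' ∨ c = '>'
      · rcases hc with rfl | rfl | rfl | rfl
        · exact pv_step_close _ '(' (by decide) rest st ih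
        · exact pv_step_close _ '[' (by decide) rest st ih
        · exact pv_step_close _ '{' (by decide) rest st ih
        · exact pv_step_close _ '<' (by decide) rest st ih
      · exact pv_step_other c rest st ho hc

theorem pvStartsValid (s : String) :
    PySem.Str.startswith (check_validity s) "valid" = pvValidLoop s.toList [] :=
  pvLoop_agree s.toList []

-- the parser, projected to its value
def pvParseV (s : List Char) : Option (List Char) := (pvParse s).map Subtype.val

theorem pvParseV_len (s r : List Char) (h : pvParseV s = some r) : r.length ≤ s.length := by
  unfold pvParseV at h
  cases hp : pvParse s with
  | none => rw [hp] at h; simp at h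
  | some v => rw [hp] at h; simp at h; exact h ▸ v.2

theorem pvParseV_nil : pvParseV [] = some [] := by
  simp [pvParseV, pvParse]

theorem pvParseV_other (c : Char) (t : List Char) (h : pvPair.get? c = none) :
    pvParseV (c :: t) = some (c :: t) := by
  simp [pvParseV, pvParse, h]

theorem pvParseV_open (c cl : Char) (t : List Char) (h : pvPair.get? c = some cl) :
    pvParseV (c :: t) =
      match pvParseV t with
      | some (d :: r) => if d = cl then pvParseV r else none
      | _ => none := by
  unfold pvParseV
  rw [pvParse]
  rw [h]
  cases hp : pvParse t with
  | none => simp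
  | some v =>
    obtain ⟨r₀, hr₀⟩ := v
    cases r₀ with
    | nil => simp
    | cons d r =>
      simp only [Option.map_some]
      by_cases hd : d = cl
      · cases hq : pvParse r <;> simp [hd, hq]
      · simp [hd]

-- the parser with an explicit stack of still-open symbols: the remainder after
-- a maximal balanced run must close the stack, group by group
def pvCheckStack : (cs : List Char) → (st : List Char) → Bool
  | cs, st =>
    match h : pvParseV cs with
    | none => false
    | some [] => st.isEmpty
    | some (d :: r') =>
      match st with
      | [] => false
      | s₀ :: st' =>
        match pvPair.get? s₀ with
        | some cl => d = cl && pvCheckStack r' st'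
        | none => false
termination_by cs _ => cs.length
decreasing_by
  have := pvParseV_len cs (d :: r') h
  simp only [List.length_cons] at this
  omega

theorem pvCS_none (cs st : List Char) (h : pvParseV cs = none) :
    pvCheckStack cs st = false := by
  rw [pvCheckStack]; split <;> simp_all

theorem pvCS_nil (cs st : List Char) (h : pvParseV cs = some []) :
    pvCheckStack cs st = st.isEmpty := by
  rw [pvCheckStack]; split <;> simp_all

theorem pvCS_cons (cs st : List Char) (d : Char) (r' : List Char)
    (h : pvParseV cs = some (d :: r')) :
    pvCheckStack cs st =
      match st with
      | [] => false
      | s₀ :: st' =>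
        match pvPair.get? s₀ with
        | some cl => d = cl && pvCheckStack r' st'
        | none => false := by
  rw [pvCheckStack]; split <;> simp_all

-- pvCheckStack depends on cs only through pvParseV cs
theorem pvCS_congr (cs₁ cs₂ st : List Char) (h : pvParseV cs₁ = pvParseV cs₂) :
    pvCheckStack cs₁ st = pvCheckStack cs₂ st := by
  cases hp : pvParseV cs₂ with
  | none => rw [pvCS_none _ _ (h.trans hp), pvCS_none _ _ hp]
  | some r =>
    cases r with
    | nil => rw [pvCS_nil _ _ (h.trans hp), pvCS_nil _ _ hp]
    | cons d r' => rw [pvCS_cons _ _ _ _ (h.trans hp), pvCS_cons _ _ _ _ hp]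

-- any key of pvPair is one of the four openers
theorem pvPair_cases (c cl : Char) (h : pvPair.get? c = some cl) :
    (c, cl) ∈ [('(',')'),('[',']'),('{','}'),('<','>')] := by
  simp only [pvPair, PySem.Dict.get?_mk_cons] at h
  split_ifs at h <;> simp_all [PySem.Dict.get?] <;> simp_all [Prod.ext_iff, eq_comm]

-- any key of pvClosers is one of the four closers
theorem pvClosers_cases (c o : Char) (h : pvClosers.get? c = some o) :
    (c, o) ∈ [(')','('),(']','['),('}','{'),('>','<')] := by
  simp only [pvClosers, PySem.Dict.get?_mk_cons] at h
  split_ifs at h <;> simp_all [PySem.Dict.get?] <;> simp_all [Prod.ext_iff, eq_comm]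

-- a closer's recorded opener re-closes to the same closer
theorem pvOpposite (c x cl₀ : Char)
    (h1 : (x, cl₀) ∈ [('(',')'),('[',']'),('{','}'),('<','>')])
    (h2 : (c, x) ∈ [(')','('),(']','['),('}','{'),('>','<')]) : c = cl₀ := by
  simp only [List.mem_cons, List.not_mem_nil, or_false, Prod.mk.injEq] at h1 h2
  rcases h1 with ⟨rfl, rfl⟩ | ⟨rfl, rfl⟩ | ⟨rfl, rfl⟩ | ⟨rfl, rfl⟩ <;>
    rcases h2 with ⟨rfl, h⟩ | ⟨rfl, h⟩ | ⟨rfl, h⟩ | ⟨rfl, h⟩ <;>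
    first | rfl | exact absurd h (by decide)

-- a closer whose opener is not the stack top cannot equal the top's closer
theorem pvMismatch (c o s₀ cl₀ : Char)
    (h1 : (s₀, cl₀) ∈ [('(',')'),('[',']'),('{','}'),('<','>')])
    (h2 : (c, o) ∈ [(')','('),(']','['),('}','{'),('>','<')])
    (hs : ¬ s₀ = o) : ¬ c = cl₀ := by
  simp only [List.mem_cons, List.not_mem_nil, or_false, Prod.mk.injEq] at h1 h2
  rcases h1 with ⟨rfl, rfl⟩ | ⟨rfl, rfl⟩ | ⟨rfl, rfl⟩ | ⟨rfl, rfl⟩ <;>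
    rcases h2 with ⟨rfl, rfl⟩ | ⟨rfl, rfl⟩ | ⟨rfl, rfl⟩ | ⟨rfl, rfl⟩ <;>
    first | decide | exact absurd rfl hs

-- main bridge: the stack scan agrees with the parser-with-stack
theorem pvVL_eq_CS (n : Nat) : ∀ (cs st : List Char), cs.length ≤ n →
    pvValidLoop cs st = pvCheckStack cs st := by
  induction n with
  | zero =>
    intro cs st hlen
    have : cs = [] := by cases cs <;> simp_all
    subst this
    rw [pvCS_nil _ _ pvParseV_nil]
    cases st <;> simp [pvValidLoop]
  | succ n ih =>
    intro cs st hlen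
    cases cs with
    | nil =>
      rw [pvCS_nil _ _ pvParseV_nil]
      cases st <;> simp [pvValidLoop]
    | cons c t =>
      simp only [List.length_cons, Nat.succ_le_succ_iff] at hlen
      by_cases ho : c = '(' ∨ c = '[' ∨ c = '{' ∨ c = '<'
      · -- opener: the scan pushes; the parser opens a group
        obtain ⟨cl, hcl⟩ : ∃ cl, pvPair.get? c = some cl := by
          rcases ho with rfl | rfl | rfl | rfl
          · exact ⟨')', by decide⟩
          · exact ⟨']', by decide⟩
          · exact ⟨'}', by decide⟩
          · exact ⟨'>', by decide⟩
        have hmem : c ∈ (['(','[','{','<'] : List Char) := by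
          rcases ho with rfl | rfl | rfl | rfl <;> decide
        have hL : pvValidLoop (c :: t) st = pvValidLoop t (c :: st) := by
          simp [pvValidLoop, hmem]
        rw [hL, ih t (c :: st) hlen]
        cases hp : pvParseV t with
        | none =>
          rw [pvCS_none t (c :: st) hp,
            pvCS_none (c :: t) st (by rw [pvParseV_open c cl t hcl, hp])]
        | some r =>
          cases r with
          | nil =>
            rw [pvCS_nil t (c :: st) hp,
              pvCS_none (c :: t) st (by rw [pvParseV_open c cl t hcl, hp])]
            simp
          | cons d r' =>
            rw [pvCS_cons _ _ _ _ hp]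
            simp only [hcl]
            by_cases hd : d = cl
            · subst hd
              have hparse : pvParseV (c :: t) = pvParseV r' := by
                rw [pvParseV_open c d t hcl, hp]; simp
              rw [pvCS_congr (c :: t) r' st hparse]
              simp
            · rw [pvCS_none (c :: t) st (by rw [pvParseV_open c cl t hcl, hp]; simp [hd])]
              simp [hd]
      · -- not an opener: the parser stops at c with the whole rest unconsumed
        have hnone : pvPair.get? c = none := by
          cases hq : pvPair.get? c with
          | none => rfl
          | some cl =>
            exfalso
            have hm := pvPair_cases c cl hq
            fin_cases hm <;> simp_all
        have hmem : ¬ c ∈ (['(','[','{','<'] : List Char) := by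
          simp only [List.mem_cons, List.not_mem_nil, or_false]
          tauto
        rw [pvCS_cons _ _ _ _ (pvParseV_other c t hnone)]
        cases st with
        | nil =>
          simp only [pvValidLoop, if_neg hmem]
          cases hq : pvClosers.get? c <;> simp
        | cons s₀ st' =>
          simp only [pvValidLoop, if_neg hmem]
          have hrec := ih t st' hlen
          cases hq : pvPair.get? s₀ with
          | none =>
            -- s₀ is not an opener, so the scan's pop can never match
            cases hr : pvClosers.get? c with
            | none => simp
            | some o =>
              have hmo := pvClosers_cases c o hr
              have hne : ¬ s₀ = o := by
                intro he; subst he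
                simp only [List.mem_cons, List.not_mem_nil, or_false,
                  Prod.mk.injEq] at hmo
                rcases hmo with ⟨rfl, rfl⟩ | ⟨rfl, rfl⟩ | ⟨rfl, rfl⟩ | ⟨rfl, rfl⟩ <;>
                  exact absurd hq (by decide)
              simp [hne]
          | some cl₀ =>
            have hmem₀ := pvPair_cases s₀ cl₀ hq
            cases hr : pvClosers.get? c with
            | none =>
              -- c is not a closer, so c ≠ cl₀ and both sides are false
              have hcne : ¬ c = cl₀ := by
                intro he; subst he
                simp only [List.mem_cons, List.not_mem_nil, or_false,
                  Prod.mk.injEq] at hmem₀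
                rcases hmem₀ with ⟨rfl, rfl⟩ | ⟨rfl, rfl⟩ | ⟨rfl, rfl⟩ | ⟨rfl, rfl⟩ <;>
                  exact absurd hr (by decide)
              simp [hcne]
            | some o =>
              have hmo := pvClosers_cases c o hr
              by_cases hs : s₀ = o
              · -- matching pop on both sides, then recurse
                subst hs
                have hc₀ : c = cl₀ := pvOpposite _ _ _ hmem₀ hmo
                subst hc₀
                simp [hrec]
              · -- mismatching pop: both sides are false
                have hcne : ¬ c = cl₀ := pvMismatch _ _ _ _ hmem₀ hmo hs
                simp [hs, hcne]

-- the scan from the empty stack accepts iff the parser consumes everything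
theorem pvCS_empty (cs : List Char) :
    pvCheckStack cs [] = (pvParseV cs == some []) := by
  cases hp : pvParseV cs with
  | none => rw [pvCS_none _ _ hp]; simp [hp]
  | some r =>
    cases r with
    | nil => rw [pvCS_nil _ _ hp]; simp [hp]
    | cons d r' => rw [pvCS_cons _ _ _ _ hp]; simp [hp]

-- A's verdict starts with "valid" exactly when B's parser consumes the string
theorem pvPred_eq (s : String) :
    PySem.Str.startswith (check_validity s) "valid"
      = ((pvParse s.toList).map Subtype.val == some []) := by
  rw [pvStartsValid, pvVL_eq_CS s.toList.length s.toList [] (Nat.le_refl _), pvCS_empty]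
  rfl

theorem pvAppendFold (l : List String) : ∀ acc : List String,
    l.foldl (fun acc i => acc ++ [check_validity i]) acc = acc ++ l.map check_validity := by
  induction l with
  | nil => simp
  | cons x xs ih => intro acc; simp [List.foldl, ih]

theorem pvCountFoldA (l : List String) : ∀ v i : Int,
    (l.map check_validity).foldl
      (fun (c : Int × Int) j =>
        if PySem.Str.startswith j "valid" then (c.1 + 1, c.2) else (c.1, c.2 + 1)) (v, i)
    = (v + (l.countP (fun s => PySem.Str.startswith (check_validity s) "valid") : Int),
       i + ((l.length : Int)
            - (l.countP (fun s => PySem.Str.startswith (check_validity s) "valid") : Int))) := by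
  induction l with
  | nil => simp
  | cons x xs ih =>
    intro v i
    simp only [List.map_cons, List.foldl_cons, List.countP_cons, List.length_cons]
    by_cases h : PySem.Str.startswith (check_validity x) "valid" = true
    · rw [if_pos h, ih]
      simp only [h, if_true, Prod.ext_iff]
      constructor <;> push_cast <;> ring
    · rw [if_neg h, ih]
      simp only [h, if_false, Prod.ext_iff]
      constructor <;> push_cast <;> ring

-- ===== VERDICT =====
theorem get_valid_invalid_text_count_spec : Claim_equal_get_valid_invalid_text_count := by
  intro l _
  unfold Spec_get_valid_invalid_text_count get_valid_invalid_text_count get_valid_invalid_text_count_alt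
  have hcong : l.countP (fun s => PySem.Str.startswith (check_validity s) "valid")
      = l.countP (fun s => (pvParse s.toList).map Subtype.val == some []) :=
    List.countP_congr (fun s _ => by rw [pvPred_eq s])
  simp only [pvAppendFold, List.nil_append, pvCountFoldA, hcong, Prod.ext_iff]
  constructor <;> push_cast <;> ring
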